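-- pv_equiv track=rewrite | github.com/deepak16686/myfirstrepository | dev-stack/backend/app/services/terraform/templates.py | _parse_stored_document
-- ===== SOURCE A (Python) =====
-- from typing import Dict, Any, Optional
--
-- def _parse_stored_document(doc: str) -> Optional[Dict[str, str]]:
--     """Parse a stored ChromaDB document back into individual .tf files."""
--     files = {}
--     markers = {
--         "### provider.tf": "provider.tf",
--         "### main.tf": "main.tf",
--         "### variables.tf": "variables.tf",
--         "### outputs.tf": "outputs.tf",
--         "### terraform.tfvars.example": "terraform.tfvars.example",
--     }
--
--     for marker, filename in markers.items():
--         if marker in doc: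
--             start = doc.index(marker) + len(marker)
--             # Find the next marker or end
--             end = len(doc)
--             for other_marker in markers:
--                 if other_marker != marker and other_marker in doc:
--                     other_pos = doc.index(other_marker)
--                     if other_pos > start and other_pos < end:
--                         end = other_pos
--
--             content = doc[start:end].strip()
--             # Remove markdown code blocks
--             if content.startswith("```"):
--                 content = content.split("\n", 1)[-1]
--             if content.endswith("```"):
--                 content = content.rsplit("```", 1)[0]
--             content = content.strip()
--             if content:
--                 files[filename] = content
--
--     return files if files else None
-- ===== SOURCE B (Python) =====
-- from typing import Dict, Any, Optional
--
-- _MARKERS = [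
--     ("### provider.tf", "provider.tf"),
--     ("### main.tf", "main.tf"),
--     ("### variables.tf", "variables.tf"),
--     ("### outputs.tf", "outputs.tf"),
--     ("### terraform.tfvars.example", "terraform.tfvars.example"),
-- ]
--
--
-- def _clean(chunk: str) -> str:
--     """Strip a section and drop a surrounding markdown code fence."""
--     content = chunk.strip()
--     if content.startswith("```"):
--         content = content.split("\n", 1)[-1]
--     if content.endswith("```"):
--         content = content.rsplit("```", 1)[0]
--     return content.strip()
--
--
-- def _parse_stored_document(doc: str) -> Optional[Dict[str, str]]:
--     """Parse a stored ChromaDB document back into individual .tf files."""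
--     # Sort the present markers by first occurrence, then walk them in position
--     # order: each section ends at the first later position past its own start.
--     entries = sorted(
--         ((doc.index(m), m, fn) for m, fn in _MARKERS if m in doc),
--         key=lambda t: t[0],
--     )
--     sections = {}
--     for i, (pos, marker, fn) in enumerate(entries):
--         start = pos + len(marker)
--         end = next((p for p, _, _ in entries[i + 1:] if p > start), len(doc))
--         content = _clean(doc[start:end])
--         if content:
--             sections[fn] = content
--     # Re-emit in marker-declaration order (the order A's dict uses).
--     files = {fn: sections[fn] for _, fn in _MARKERS if fn in sections}
--     return files or None
-- ===== Notes on version B (the rewrite author's own statement) =====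
-- stated objective: alternative
-- what changed: A loops over markers in declaration order and, for each, rescans all other markers in a nested loop taking a running minimum to find the section end; B instead sorts the present markers by first occurrence and walks them in position order, taking each section's end from the next sorted entry past its start, then re-emits the sections in marker-declaration order.
import Mathlib
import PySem

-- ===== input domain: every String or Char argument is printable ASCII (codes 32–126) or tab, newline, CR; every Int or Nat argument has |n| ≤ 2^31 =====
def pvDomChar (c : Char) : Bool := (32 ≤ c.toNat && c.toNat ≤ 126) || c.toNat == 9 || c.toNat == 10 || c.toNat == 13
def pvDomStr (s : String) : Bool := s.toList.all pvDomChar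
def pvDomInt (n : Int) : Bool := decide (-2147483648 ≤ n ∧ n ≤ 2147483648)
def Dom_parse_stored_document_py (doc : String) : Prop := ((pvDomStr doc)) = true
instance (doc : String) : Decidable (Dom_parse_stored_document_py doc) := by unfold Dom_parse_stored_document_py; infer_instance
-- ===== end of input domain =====

-- B replaces A's nested marker-rescan loop by sort-by-first-occurrence and a walk of the
-- sorted entries (each section ends at the next sorted position past its start), re-emitted
-- in marker order (objective: alternative algorithm).

-- the fixed marker table (Python: the `markers` dict, insertion order)
def pvMarkers : List (String × String) :=
  [("### provider.tf", "provider.tf"),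
   ("### main.tf", "main.tf"),
   ("### variables.tf", "variables.tf"),
   ("### outputs.tf", "outputs.tf"),
   ("### terraform.tfvars.example", "terraform.tfvars.example")]

-- ===== PORT A =====
-- A's inline content cleanup: strip, drop a leading/trailing ``` code fence, strip again.
-- content.rsplit("```", 1)[0] is ported as content[:content.rfind("```")], exact under the
-- endswith("```") guard (the separator then occurs, at its highest index).
def pvCleanA (chunk : String) : String :=
  let content := PySem.Str.strip chunk
  let content :=
    if PySem.Str.startswith content "```" then
      match PySem.Str.splitMax? content "\n" 1 with   -- some: separator "\n" is nonempty
      | some parts => (PySem.List.pyGet? parts (-1)).getD content   -- [-1]: split is never empty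
      | none => content
    else content
  let content :=
    if PySem.Str.endswith content "```" then
      PySem.Str.slice content none (some (PySem.Str.rfind content "```"))
    else content
  PySem.Str.strip content

def parse_stored_document_py (doc : String) : Option (List (String × String)) :=
  let files := pvMarkers.foldl (fun files mf =>
    if PySem.Str.isIn mf.1 doc then
      let start := PySem.Str.find doc mf.1 + PySem.Str.len mf.1
      let end_ := pvMarkers.foldl (fun e om =>
        if om.1 ≠ mf.1 ∧ PySem.Str.isIn om.1 doc then
          let op := PySem.Str.find doc om.1
          if start < op ∧ op < e then op else e
        else e) (PySem.Str.len doc)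
      let content := pvCleanA (PySem.Str.slice doc (some start) (some end_))
      if content ≠ "" then files.insert mf.2 content else files
    else files) PySem.Dict.empty
  if files.items = [] then none else some files.items

-- ===== PORT B =====
-- Source B's helper _clean (same cleanup lines; rsplit ported as for A)
def pvCleanB (chunk : String) : String :=
  let content := PySem.Str.strip chunk
  let content :=
    if PySem.Str.startswith content "```" then
      match PySem.Str.splitMax? content "\n" 1 with
      | some parts => (PySem.List.pyGet? parts (-1)).getD content
      | none => content
    else content
  let content :=
    if PySem.Str.endswith content "```" then
      PySem.Str.slice content none (some (PySem.Str.rfind content "```"))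
    else content
  PySem.Str.strip content

-- Source B's `for i, (pos, marker, fn) in enumerate(entries)` walk: structural recursion with the
-- suffix entries[i+1:] at hand; `next((p for p,_,_ in suffix if p > start), len(doc))` is the
-- find?-with-default on the suffix.
def pvGoB (doc : String) : List (Int × String × String) → PySem.Dict String String → PySem.Dict String String
  | [], sections => sections
  | (pos, marker, fn) :: rest, sections =>
    let start := pos + PySem.Str.len marker
    let end_ := ((rest.find? (fun u => decide (start < u.1))).map (fun u => u.1)).getD (PySem.Str.len doc)
    let content := pvCleanB (PySem.Str.slice doc (some start) (some end_))
    pvGoB doc rest (if content ≠ "" then sections.insert fn content else sections)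

def parse_stored_document_py_alt (doc : String) : Option (List (String × String)) :=
  let entries := PySem.List.sorted (pvMarkers.filterMap (fun mf =>
    if PySem.Str.isIn mf.1 doc then some (PySem.Str.find doc mf.1, mf.1, mf.2) else none))
    (fun t => t.1)
  let sections := pvGoB doc entries PySem.Dict.empty
  let files := pvMarkers.foldl (fun files mf =>
    match sections.get? mf.2 with
    | some c => files.insert mf.2 c
    | none => files) PySem.Dict.empty
  if files.items = [] then none else some files.items

-- ===== PRECONDITION & SPEC =====
def Spec_parse_stored_document_py (doc : String) (out : Option (List (String × String))) : Prop := out = parse_stored_document_py_alt doc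
instance (doc : String) (out : Option (List (String × String))) : Decidable (Spec_parse_stored_document_py doc out) := by unfold Spec_parse_stored_document_py; infer_instance

-- ===== CLAIM (what is proved, stated in full; the proofs are below) =====
def Claim_equal_parse_stored_document_py : Prop := ∀ (doc : String), Dom_parse_stored_document_py doc → Spec_parse_stored_document_py doc (parse_stored_document_py doc)

-- ===== LEMMAS AND PROOFS =====

-- proof-side names
def pvFoundB (doc : String) : List (Int × String × String) :=
  pvMarkers.filterMap (fun mf =>
    if PySem.Str.isIn mf.1 doc then some (PySem.Str.find doc mf.1, mf.1, mf.2) else none)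

def pvEntries (doc : String) : List (Int × String × String) :=
  PySem.List.sorted (pvFoundB doc) (fun t => t.1)

def pvPos (doc : String) : List Int :=
  pvMarkers.filterMap (fun mf =>
    if PySem.Str.isIn mf.1 doc then some (PySem.Str.find doc mf.1) else none)

def pvEnd (doc : String) (start : Int) : Int :=
  PySem.List.minD ((pvPos doc).filter (fun q => start < q)) id (PySem.Str.len doc)

def pvC (doc m : String) : String :=
  pvCleanA (PySem.Str.slice doc (some (PySem.Str.find doc m + PySem.Str.len m))
    (some (pvEnd doc (PySem.Str.find doc m + PySem.Str.len m))))

def pvStepC (doc : String) (d : PySem.Dict String String) (t : Int × String × String) :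
    PySem.Dict String String :=
  if pvC doc t.2.1 ≠ "" then d.insert t.2.2 (pvC doc t.2.1) else d

theorem pv_foldl_guard {α β σ : Type} (l : List α) (g : α → Prop) [DecidablePred g]
    (f : α → β) (step : σ → β → σ) (s0 : σ) :
    l.foldl (fun s a => if g a then step s (f a) else s) s0
      = (l.filterMap (fun a => if g a then some (f a) else none)).foldl step s0 := by
  induction l generalizing s0 with
  | nil => rfl
  | cons a l ih =>
    by_cases h : g a <;> simp [h, ih]

theorem pv_fold_if_min (l : List Int) (start : Int) (e0 : Int) :
    l.foldl (fun e p => if start < p ∧ p < e then p else e) e0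
      = (l.filter (fun p => start < p)).foldl min e0 := by
  induction l generalizing e0 with
  | nil => rfl
  | cons p l ih =>
    simp only [List.foldl_cons, List.filter_cons]
    by_cases h : start < p
    · have h2 : (if start < p ∧ p < e0 then p else e0) = min e0 p := by
        rw [Int.min_def]; split_ifs <;> omega
      rw [h2, ih]
      simp [h]
    · have h2 : (if start < p ∧ p < e0 then p else e0) = e0 := by
        rw [if_neg]; omega
      rw [h2, ih]
      simp [h]

theorem pv_min?_cons (l : List Int) : ∀ x : Int, PySem.List.min? (x :: l) id = some (l.foldl min x) := by
  induction l with
  | nil => intro x; rfl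
  | cons y l ih =>
    intro x
    have hacc : (if y < x then y else x) = min x y := by
      rw [Int.min_def]; split_ifs <;> omega
    have h1 : PySem.List.min? (x :: y :: l) id = PySem.List.min? (min x y :: l) id := by
      by_cases h : y < x <;>
        simp only [PySem.List.min?, List.foldl_cons] <;>
        simp [h, ← hacc]
    rw [h1, ih, List.foldl_cons]

theorem pv_minD_foldl (l : List Int) (d : Int) (h : ∀ p ∈ l, p ≤ d) :
    PySem.List.minD l id d = l.foldl min d := by
  cases l with
  | nil => rfl
  | cons x l =>
    have hx : x ≤ d := h x (by simp)
    have h0 : PySem.List.minD (x :: l) id d = (PySem.List.min? (x :: l) id).getD d := rfl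
    rw [h0, pv_min?_cons]
    simp only [Option.getD_some, List.foldl_cons]
    have hdx : min d x = x := by omega
    rw [hdx]

-- dropping marker m's own entry does not change the qualifying positions
theorem pv_filter_ne_eq (doc m : String) (start : Int) (hm : ¬ start < PySem.Str.find doc m)
    (l : List (String × String)) :
    ((l.filterMap (fun om =>
        if om.1 ≠ m ∧ PySem.Str.isIn om.1 doc then some (PySem.Str.find doc om.1) else none)).filter
      (fun q => start < q))
    = ((l.filterMap (fun mf =>
        if PySem.Str.isIn mf.1 doc then some (PySem.Str.find doc mf.1) else none)).filter
      (fun q => start < q)) := by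
  induction l with
  | nil => rfl
  | cons a l ih =>
    simp only [List.filterMap_cons]
    by_cases hi : PySem.Str.isIn a.1 doc
    · by_cases he : a.1 = m
      · rw [if_neg (fun h => h.1 he), if_pos hi, List.filter_cons,
          if_neg (by simp only [decide_eq_true_eq, he]; exact hm)]
        exact ih
      · rw [if_pos ⟨he, hi⟩, if_pos hi, List.filter_cons, List.filter_cons, ih]
    · rw [if_neg (fun h => hi h.2), if_neg hi]
      exact ih

theorem pv_pos_le (doc : String) : ∀ q ∈ pvPos doc, q ≤ PySem.Str.len doc := by
  intro q hq
  simp only [pvPos, List.mem_filterMap] at hq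
  obtain ⟨mf, _, hmf⟩ := hq
  split at hmf
  · injection hmf with hmf
    subst hmf
    rw [PySem.Str.find_eq, PySem.Str.len_eq_length]
    have h := PySem.Chars.find_le_length doc.toList mf.1.toList
    simpa using h
  · cases hmf

theorem pv_len_nonneg (m : String) : 0 ≤ PySem.Str.len m := by
  rw [PySem.Str.len_eq_length]; exact Int.natCast_nonneg _

-- A's inner end-search fold equals pvEnd
theorem pv_endA_eq (doc m : String) :
    pvMarkers.foldl (fun e om =>
      if om.1 ≠ m ∧ PySem.Str.isIn om.1 doc then
        let op := PySem.Str.find doc om.1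
        if PySem.Str.find doc m + PySem.Str.len m < op ∧ op < e then op else e
      else e) (PySem.Str.len doc)
    = pvEnd doc (PySem.Str.find doc m + PySem.Str.len m) := by
  have hstart : ¬ (PySem.Str.find doc m + PySem.Str.len m < PySem.Str.find doc m) := by
    have := pv_len_nonneg m; omega
  have h1 := pv_foldl_guard pvMarkers
    (fun om => om.1 ≠ m ∧ PySem.Str.isIn om.1 doc = true)
    (fun om => PySem.Str.find doc om.1)
    (fun e op => if PySem.Str.find doc m + PySem.Str.len m < op ∧ op < e then op else e)
    (PySem.Str.len doc)
  rw [h1, pv_fold_if_min, pv_filter_ne_eq doc m _ hstart]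
  have hpp : List.filterMap (fun mf =>
      if PySem.Str.isIn mf.1 doc = true then some (PySem.Str.find doc mf.1) else none) pvMarkers
      = pvPos doc := rfl
  rw [hpp]
  unfold pvEnd
  rw [pv_minD_foldl _ _ (fun p hp => pv_pos_le doc p (List.mem_of_mem_filter hp))]

-- A as a clean fold over pvMarkers with pvC contents
theorem pv_A_eq (doc : String) :
    parse_stored_document_py doc
      = (if (pvMarkers.foldl (fun files mf =>
            if PySem.Str.isIn mf.1 doc then
              (if pvC doc mf.1 ≠ "" then files.insert mf.2 (pvC doc mf.1) else files)
            else files) PySem.Dict.empty).items = [] then none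
         else some (pvMarkers.foldl (fun files mf =>
            if PySem.Str.isIn mf.1 doc then
              (if pvC doc mf.1 ≠ "" then files.insert mf.2 (pvC doc mf.1) else files)
            else files) PySem.Dict.empty).items) := by
  have hstep : (fun (files : PySem.Dict String String) (mf : String × String) =>
      if PySem.Str.isIn mf.1 doc then
        let start := PySem.Str.find doc mf.1 + PySem.Str.len mf.1
        let end_ := pvMarkers.foldl (fun e om =>
          if om.1 ≠ mf.1 ∧ PySem.Str.isIn om.1 doc then
            let op := PySem.Str.find doc om.1
            if start < op ∧ op < e then op else e
          else e) (PySem.Str.len doc)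
        let content := pvCleanA (PySem.Str.slice doc (some start) (some end_))
        if content ≠ "" then files.insert mf.2 content else files
      else files)
    = (fun files mf =>
        if PySem.Str.isIn mf.1 doc then
          (if pvC doc mf.1 ≠ "" then files.insert mf.2 (pvC doc mf.1) else files)
        else files) := by
    funext files mf
    by_cases hi : PySem.Str.isIn mf.1 doc
    · simp only [if_pos hi, pv_endA_eq doc mf.1, pvC]
    · simp only [if_neg hi]
  unfold parse_stored_document_py
  rw [hstep]

-- every position ≤ start fails the filter; used to drop the prefix
theorem pv_filter_drop (start : Int) (l : List Int) (h : ∀ p ∈ l, p ≤ start) :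
    l.filter (fun p => start < p) = [] := by
  rw [List.filter_eq_nil_iff]
  intro p hp
  simp only [decide_eq_true_eq]
  have := h p hp; omega

theorem pv_foldl_min_const (x : Int) (l : List Int) (h : ∀ y ∈ l, x ≤ y) :
    l.foldl min x = x := by
  induction l with
  | nil => rfl
  | cons y l ih =>
    simp only [List.foldl_cons]
    have hy : x ≤ y := h y (by simp)
    have : min x y = x := by omega
    rw [this]
    exact ih (fun z hz => h z (by simp [hz]))

-- on a ≤-sorted list whose elements are ≤ d, first-past-start with default d is the min fold
theorem pv_find_min (S : List Int) (start d : Int) (hd : ∀ p ∈ S, p ≤ d)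
    (hs : S.Pairwise (· ≤ ·)) :
    ((S.find? (fun p => decide (start < p))).getD d)
      = (S.filter (fun p => start < p)).foldl min d := by
  induction S with
  | nil => rfl
  | cons x l ih =>
    rw [List.pairwise_cons] at hs
    by_cases h : start < x
    · rw [List.find?_cons_of_pos (by simpa using h), List.filter_cons,
        if_pos (by simpa using h)]
      simp only [Option.getD_some, List.foldl_cons]
      have hx : min d x = x := by have := hd x (by simp); omega
      rw [hx]
      exact (pv_foldl_min_const x _ (fun y hy => hs.1 y (List.mem_of_mem_filter hy))).symm
    · rw [List.find?_cons_of_neg (by simpa using h), List.filter_cons,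
        if_neg (by simpa using h)]
      exact ih (fun p hp => hd p (by simp [hp])) hs.2

theorem pv_mem_foundB (doc : String) (t : Int × String × String) (ht : t ∈ pvFoundB doc) :
    PySem.Str.isIn t.2.1 doc = true ∧ t.1 = PySem.Str.find doc t.2.1 ∧ (t.2.1, t.2.2) ∈ pvMarkers := by
  simp only [pvFoundB, List.mem_filterMap] at ht
  obtain ⟨mf, hmf, heq⟩ := ht
  split at heq
  · injection heq with hv
    subst hv
    simp_all
  · cases heq

theorem pv_map_fst_foundB (doc : String) : (pvFoundB doc).map (fun t => t.1) = pvPos doc := by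
  simp only [pvFoundB, pvPos, List.map_filterMap]
  congr 1
  funext mf
  by_cases hi : PySem.Str.isIn mf.1 doc
  · rw [if_pos hi, if_pos hi]; rfl
  · rw [if_neg hi, if_neg hi]; rfl

-- the boundary computed from the sorted suffix equals pvEnd
theorem pv_end_of_entries (doc : String) (pre rest : List (Int × String × String))
    (t : Int × String × String) (h : pvEntries doc = pre ++ t :: rest) :
    (((rest.find? (fun u => decide (t.1 + PySem.Str.len t.2.1 < u.1))).map (fun u => u.1)).getD
      (PySem.Str.len doc))
    = pvEnd doc (t.1 + PySem.Str.len t.2.1) := by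
  set start := t.1 + PySem.Str.len t.2.1 with hstart
  have hts : t.1 ≤ start := by have := pv_len_nonneg t.2.1; omega
  have hperm : (pvEntries doc).Perm (pvFoundB doc) := PySem.List.sorted_perm _ _ _
  have hpw : (pvEntries doc).Pairwise (fun a b => a.1 ≤ b.1) := PySem.List.sorted_pairwise _ _
  rw [h] at hperm hpw
  have hpermPos : ((pre ++ t :: rest).map (fun u => u.1)).Perm (pvPos doc) := by
    rw [← pv_map_fst_foundB doc]
    exact hperm.map _
  have hpre : ∀ u ∈ pre, u.1 ≤ start := by
    intro u hu
    have := (List.pairwise_append.mp hpw).2.2 u hu t (by simp)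
    omega
  have hrest : (rest.map (fun u => u.1)).Pairwise (· ≤ ·) := by
    have h1 : (t :: rest).Pairwise (fun a b => a.1 ≤ b.1) := (List.pairwise_append.mp hpw).2.1
    exact ((List.pairwise_cons.mp h1).2).map _ (fun a b hab => hab)
  have hle : ∀ p ∈ (rest.map (fun u => u.1)), p ≤ PySem.Str.len doc := by
    intro p hp
    refine pv_pos_le doc p (hpermPos.mem_iff.mp ?_)
    simp only [List.map_append, List.map_cons, List.mem_append, List.mem_cons]
    right; right; exact hp
  have hf : ((pre ++ t :: rest).map (fun u => u.1)).filter (fun q => decide (start < q))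
      = (rest.map (fun u => u.1)).filter (fun q => decide (start < q)) := by
    simp only [List.map_append, List.map_cons, List.filter_append, List.filter_cons]
    rw [pv_filter_drop start _ (fun p hp => by
      obtain ⟨u, hu, hv⟩ := List.mem_map.mp hp
      exact hv ▸ hpre u hu)]
    rw [if_neg (by simpa using (by omega : ¬ start < t.1))]
    simp
  have hrc : RightCommutative (min : Int → Int → Int) :=
    ⟨fun b a a' => by simp only [Int.min_def]; split_ifs <;> omega⟩
  have hpermF : ((pvPos doc).filter (fun q => decide (start < q))).Perm
      ((rest.map (fun u => u.1)).filter (fun q => decide (start < q))) := by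
    rw [← hf]
    exact (hpermPos.filter _).symm
  have hfold : ((pvPos doc).filter (fun q => decide (start < q))).foldl min (PySem.Str.len doc)
      = ((rest.map (fun u => u.1)).filter (fun q => decide (start < q))).foldl min
        (PySem.Str.len doc) := @List.Perm.foldl_eq _ _ min _ _ hrc hpermF _
  have hmapfind : (rest.find? (fun u => decide (start < u.1))).map (fun u => u.1)
      = (rest.map (fun u => u.1)).find? (fun p => decide (start < p)) := by
    rw [List.find?_map]
    rfl
  rw [hmapfind, pv_find_min _ start _ hle hrest]
  unfold pvEnd
  rw [pv_minD_foldl _ _ (fun p hp => pv_pos_le doc p (List.mem_of_mem_filter hp))]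
  exact hfold.symm

-- the walk of the sorted entries is the pvStepC fold
set_option maxHeartbeats 1000000 in
theorem pv_goB_eq (doc : String) :
    ∀ (l pre : List (Int × String × String)) (d : PySem.Dict String String),
      pvEntries doc = pre ++ l → pvGoB doc l d = l.foldl (pvStepC doc) d := by
  intro l
  induction l with
  | nil => intro pre d _; rfl
  | cons t rest ih =>
    intro pre d hsplit
    obtain ⟨pos, m, fn⟩ := t
    have hmem : (pos, m, fn) ∈ pvFoundB doc := by
      have : (pos, m, fn) ∈ pvEntries doc := by rw [hsplit]; simp
      exact (PySem.List.mem_sorted _ _ _ _).mp this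
    have hposm : pos = PySem.Str.find doc m := (pv_mem_foundB doc _ hmem).2.1
    have hend : ((rest.find? (fun u => decide (pos + PySem.Str.len m < u.1))).map
        (fun u => u.1)).getD (PySem.Str.len doc) = pvEnd doc (pos + PySem.Str.len m) := by
      simpa using pv_end_of_entries doc pre rest (pos, m, fn) hsplit
    simp only [pvGoB]
    have harg : (if pvCleanB (PySem.Str.slice doc (some (pos + PySem.Str.len m))
          (some (((rest.find? (fun u => decide (pos + PySem.Str.len m < u.1))).map
            (fun u => u.1)).getD (PySem.Str.len doc)))) ≠ "" then
        d.insert fn (pvCleanB (PySem.Str.slice doc (some (pos + PySem.Str.len m))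
          (some (((rest.find? (fun u => decide (pos + PySem.Str.len m < u.1))).map
            (fun u => u.1)).getD (PySem.Str.len doc)))))
      else d) = pvStepC doc d (pos, m, fn) := by
      rw [show pvCleanB = pvCleanA from rfl, hend, hposm]
      unfold pvStepC pvC
      rfl
    refine Eq.trans (ih (pre ++ [(pos, m, fn)]) _ (by rw [hsplit]; simp)) ?_
    rw [harg]
    conv_rhs => rw [List.foldl_cons]

-- lookup in the section dict built by the fold
theorem pv_get_none (doc fn : String) :
    ∀ (l : List (Int × String × String)) (d : PySem.Dict String String),
      (∀ t ∈ l, t.2.2 = fn → pvC doc t.2.1 = "") →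
      (l.foldl (pvStepC doc) d).get? fn = d.get? fn := by
  intro l
  induction l with
  | nil => intro d _; rfl
  | cons u l ih =>
    intro d hnone
    rw [List.foldl_cons]
    rw [ih _ (fun t ht => hnone t (by simp [ht]))]
    unfold pvStepC
    by_cases hc : pvC doc u.2.1 ≠ ""
    · rw [if_pos hc]
      have hne : fn ≠ u.2.2 := fun he => hc (hnone u (by simp) he.symm)
      simp [PySem.Dict.get?_insert, hne]
    · rw [if_neg hc]

theorem pv_get_mem (doc fn : String) (t : Int × String × String) (htf : t.2.2 = fn) :
    ∀ (l : List (Int × String × String)) (d : PySem.Dict String String),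
      (l.map (fun u => u.2.2)).Nodup → t ∈ l →
      (l.foldl (pvStepC doc) d).get? fn
        = if pvC doc t.2.1 ≠ "" then some (pvC doc t.2.1) else d.get? fn := by
  intro l
  induction l with
  | nil => intro d _ hmem; cases hmem
  | cons u l ih =>
    intro d hnd hmem
    rw [List.map_cons, List.nodup_cons] at hnd
    rw [List.foldl_cons]
    rcases List.mem_cons.mp hmem with he | hl
    · subst he
      have hnotin : ∀ v ∈ l, v.2.2 = fn → pvC doc v.2.1 = "" := by
        intro v hv hvf
        exfalso
        apply hnd.1
        have hvm : v.2.2 ∈ List.map (fun u => u.2.2) l := List.mem_map.mpr ⟨v, hv, rfl⟩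
        rwa [hvf, ← htf] at hvm
      rw [pv_get_none doc fn l _ hnotin]
      unfold pvStepC
      by_cases hc : pvC doc t.2.1 ≠ ""
      · rw [if_pos hc, if_pos hc, htf, PySem.Dict.get?_insert_self]
      · rw [if_neg hc, if_neg hc]
    · have hne : u.2.2 ≠ fn := by
        intro he2
        apply hnd.1
        have htm : t.2.2 ∈ List.map (fun u => u.2.2) l := List.mem_map.mpr ⟨t, hl, rfl⟩
        rwa [htf, ← he2] at htm
      have hstep : (pvStepC doc d u).get? fn = d.get? fn := by
        unfold pvStepC
        by_cases hc : pvC doc u.2.1 ≠ ""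
        · rw [if_pos hc]
          have hne2 : fn ≠ u.2.2 := fun he2 => hne he2.symm
          simp [PySem.Dict.get?_insert, hne2]
        · rw [if_neg hc]
      rw [ih _ hnd.2 hl, hstep]

-- the filenames of the found entries are distinct
theorem pv_filterMap_snd_sublist (doc : String) (l : List (String × String)) :
    ((l.filterMap (fun mf =>
        if PySem.Str.isIn mf.1 doc then some (PySem.Str.find doc mf.1, mf.1, mf.2) else none)).map
      (fun t => t.2.2)).Sublist (l.map (fun mf => mf.2)) := by
  induction l with
  | nil => exact List.Sublist.refl _
  | cons a l ih =>
    rw [List.filterMap_cons, List.map_cons]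
    by_cases hi : PySem.Str.isIn a.1 doc
    · rw [if_pos hi, List.map_cons]
      exact ih.cons₂ _
    · rw [if_neg hi]
      exact ih.cons _

theorem pv_nodup_foundB (doc : String) : ((pvFoundB doc).map (fun t => t.2.2)).Nodup :=
  (pv_filterMap_snd_sublist doc pvMarkers).nodup (by decide)

theorem pv_nodup_entries (doc : String) : ((pvEntries doc).map (fun t => t.2.2)).Nodup := by
  have hperm : (pvEntries doc).Perm (pvFoundB doc) := PySem.List.sorted_perm _ _ _
  exact (hperm.map _).nodup_iff.mpr (pv_nodup_foundB doc)

-- a filename determines its marker in the table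
theorem pv_fn_unique (m m' fn : String) (h : (m, fn) ∈ pvMarkers) (h' : (m', fn) ∈ pvMarkers) :
    m = m' := by
  simp only [pvMarkers, List.mem_cons, Prod.mk.injEq] at h h'
  rcases h with ⟨hm, hf⟩ | ⟨hm, hf⟩ | ⟨hm, hf⟩ | ⟨hm, hf⟩ | ⟨hm, hf⟩ <;>
    rcases h' with ⟨hm', hf'⟩ | ⟨hm', hf'⟩ | ⟨hm', hf'⟩ | ⟨hm', hf'⟩ | ⟨hm', hf'⟩ <;>
    simp_all

-- the section lookup for each marker row
theorem pv_get_char (doc : String) (mf : String × String) (hmf : mf ∈ pvMarkers) :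
    ((pvEntries doc).foldl (pvStepC doc) PySem.Dict.empty).get? mf.2
      = (if PySem.Str.isIn mf.1 doc ∧ pvC doc mf.1 ≠ "" then some (pvC doc mf.1) else none) := by
  by_cases hi : PySem.Str.isIn mf.1 doc
  · by_cases hc : pvC doc mf.1 ≠ ""
    · rw [if_pos ⟨hi, hc⟩]
      have hmem : (PySem.Str.find doc mf.1, mf.1, mf.2) ∈ pvEntries doc := by
        rw [pvEntries, PySem.List.mem_sorted]
        simp only [pvFoundB, List.mem_filterMap]
        exact ⟨mf, hmf, by rw [if_pos hi]⟩
      rw [pv_get_mem doc mf.2 (PySem.Str.find doc mf.1, mf.1, mf.2) rfl _ _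
        (pv_nodup_entries doc) hmem, if_pos hc]
    · rw [if_neg (fun hx => hc hx.2)]
      have hnone : ∀ t ∈ pvEntries doc, t.2.2 = mf.2 → pvC doc t.2.1 = "" := by
        intro t ht htf
        have htF := (PySem.List.mem_sorted _ _ _ _).mp ht
        obtain ⟨_, _, htm⟩ := pv_mem_foundB doc t htF
        have : t.2.1 = mf.1 := pv_fn_unique _ _ _ (htf ▸ htm) (by
          obtain ⟨a, b⟩ := mf; exact hmf)
        rw [this]
        simpa using hc
      rw [pv_get_none doc mf.2 _ _ hnone]
      rfl
  · rw [if_neg (fun hx => hi hx.1)]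
    have hnone : ∀ t ∈ pvEntries doc, t.2.2 = mf.2 → pvC doc t.2.1 = "" := by
      intro t ht htf
      have htF := (PySem.List.mem_sorted _ _ _ _).mp ht
      obtain ⟨hti, _, htm⟩ := pv_mem_foundB doc t htF
      have : t.2.1 = mf.1 := pv_fn_unique _ _ _ (htf ▸ htm) (by
        obtain ⟨a, b⟩ := mf; exact hmf)
      rw [this] at hti
      exact absurd hti (by simpa using hi)
    rw [pv_get_none doc mf.2 _ _ hnone]
    rfl

-- ===== VERDICT (by name: the statement is the Claim_ definition above) =====
theorem parse_stored_document_py_spec : Claim_equal_parse_stored_document_py := by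
  intro doc _
  unfold Spec_parse_stored_document_py
  show parse_stored_document_py doc = parse_stored_document_py_alt doc
  have hB : parse_stored_document_py_alt doc
      = (if (pvMarkers.foldl (fun files mf =>
            match (pvGoB doc (pvEntries doc) PySem.Dict.empty).get? mf.2 with
            | some c => files.insert mf.2 c
            | none => files) PySem.Dict.empty).items = [] then none
         else some (pvMarkers.foldl (fun files mf =>
            match (pvGoB doc (pvEntries doc) PySem.Dict.empty).get? mf.2 with
            | some c => files.insert mf.2 c
            | none => files) PySem.Dict.empty).items) := rfl
  rw [pv_A_eq doc, hB, pv_goB_eq doc (pvEntries doc) [] PySem.Dict.empty rfl]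
  have hcong : pvMarkers.foldl (fun files mf =>
      match ((pvEntries doc).foldl (pvStepC doc) PySem.Dict.empty).get? mf.2 with
      | some c => files.insert mf.2 c
      | none => files) PySem.Dict.empty
    = pvMarkers.foldl (fun files mf =>
        if PySem.Str.isIn mf.1 doc then
          (if pvC doc mf.1 ≠ "" then files.insert mf.2 (pvC doc mf.1) else files)
        else files) PySem.Dict.empty :=
    PySem.List.foldl_congr_mem pvMarkers _ _ PySem.Dict.empty (fun files mf hmf => by
      rw [pv_get_char doc mf hmf]
      by_cases hi : PySem.Str.isIn mf.1 doc
      · by_cases hc : pvC doc mf.1 ≠ ""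
        · rw [if_pos ⟨hi, hc⟩, if_pos hi, if_pos hc]
        · rw [if_neg (fun hx => hc hx.2), if_pos hi, if_neg hc]
      · rw [if_neg (fun hx => hi hx.1), if_neg hi])
  rw [hcong]
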